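-- pv_equiv track=rewrite | github.com/eddy-san/raspberry-cam | modules/rainintensity.py | _grid_cols_rows
-- ===== SOURCE A (Python) =====
-- def _grid_cols_rows(n: int) -> tuple[int, int]:
--     if n <= 0:
--         raise ValueError("tiles must not be empty")
--     cols = 1
--     while (cols + 1) * (cols + 1) <= n:
--         cols += 1
--     while n % cols != 0 and cols > 1:
--         cols -= 1
--     rows = (n + cols - 1) // cols
--     return cols, rows
-- ===== SOURCE B (Python) =====
-- def _grid_cols_rows(n: int) -> tuple[int, int]:
--     if n <= 0:
--         raise ValueError("tiles must not be empty")
--     cols = 1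
--     i = 1
--     while i * i <= n:
--         if n % i == 0:
--             cols = i
--         i += 1
--     return cols, n // cols
-- ===== Notes on version B (the rewrite author's own statement) =====
-- stated objective: simpler
-- what changed: Replaces A's two scans (increment to floor(sqrt(n)), then decrement to the nearest divisor) with a single upward scan that keeps the largest divisor i with i*i <= n, and computes rows as n // cols since cols divides n.
import Mathlib
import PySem

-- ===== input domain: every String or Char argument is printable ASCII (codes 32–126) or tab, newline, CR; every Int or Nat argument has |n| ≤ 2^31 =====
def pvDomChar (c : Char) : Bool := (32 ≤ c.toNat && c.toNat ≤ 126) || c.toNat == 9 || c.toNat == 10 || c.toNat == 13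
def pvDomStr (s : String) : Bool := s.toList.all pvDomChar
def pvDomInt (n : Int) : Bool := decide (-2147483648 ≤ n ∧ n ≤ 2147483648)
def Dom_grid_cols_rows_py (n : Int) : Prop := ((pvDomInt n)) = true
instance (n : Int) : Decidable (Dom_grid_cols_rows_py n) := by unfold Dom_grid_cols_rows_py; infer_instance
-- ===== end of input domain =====

-- B replaces A's two scans (count up to floor(sqrt n), then count down to a divisor) with one
-- upward scan keeping the largest divisor i with i*i ≤ n, and returns rows = n // cols; same cost, simpler.
-- (Loops are ported as structural recursion on a fuel counter that provably never runs out.)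

-- ===== PORT A =====
-- first while loop: cols += 1 while (cols+1)^2 ≤ n
def aLoop1 (fuel : Nat) (n c : Int) : Int :=
  match fuel with
  | 0 => c
  | fuel + 1 => if (c + 1) * (c + 1) ≤ n then aLoop1 fuel n (c + 1) else c

-- second while loop: cols -= 1 while n % cols ≠ 0 and cols > 1
def aLoop2 (fuel : Nat) (n c : Int) : Int :=
  match fuel with
  | 0 => c
  | fuel + 1 => if PySem.Int.mod n c ≠ 0 ∧ 1 < c then aLoop2 fuel n (c - 1) else c

def grid_cols_rows_py (n : Int) : Int × Int :=
  if n ≤ 0 then (0, 0)  -- Python raises ValueError here; excluded by Pre_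
  else
    let cols := aLoop2 n.toNat n (aLoop1 n.toNat n 1)
    (cols, PySem.Int.floordiv (n + cols - 1) cols)

-- ===== PORT B =====
-- single while loop: for i with i*i ≤ n, keep the last i dividing n
def bLoop (fuel : Nat) (n i cols : Int) : Int :=
  match fuel with
  | 0 => cols
  | fuel + 1 =>
    if i * i ≤ n then
      bLoop fuel n (i + 1) (if PySem.Int.mod n i = 0 then i else cols)
    else cols

def grid_cols_rows_py_alt (n : Int) : Int × Int :=
  if n ≤ 0 then (0, 0)  -- Python raises ValueError here; excluded by Pre_
  else
    let cols := bLoop n.toNat n 1 1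
    (cols, PySem.Int.floordiv n cols)

-- ===== PRECONDITION & SPEC =====
-- Pre_ excludes exactly n ≤ 0, where the Python raises ValueError.
def Pre_grid_cols_rows_py (n : Int) : Prop := 0 < n
instance (n : Int) : Decidable (Pre_grid_cols_rows_py n) := by unfold Pre_grid_cols_rows_py; infer_instance
def pvWitness_grid_cols_rows_py : Int := (12)

def Spec_grid_cols_rows_py (n : Int) (out : Int × Int) : Prop := out = grid_cols_rows_py_alt n
instance (n : Int) (out : Int × Int) : Decidable (Spec_grid_cols_rows_py n out) := by unfold Spec_grid_cols_rows_py; infer_instance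

-- ===== CLAIM (what is proved, stated in full; the proofs are below) =====
def Claim_equal_grid_cols_rows_py : Prop := ∀ (n : Int), Dom_grid_cols_rows_py n → Pre_grid_cols_rows_py n → Spec_grid_cols_rows_py n (grid_cols_rows_py n)

-- ===== LEMMAS AND PROOFS =====

-- with enough fuel, aLoop1 yields floor(sqrt n): the largest s ≥ c with s² ≤ n
theorem aLoop1_spec (fuel : Nat) (n c : Int) (h : c * c ≤ n) (hf : n - c ≤ (fuel : Int)) :
    c ≤ aLoop1 fuel n c ∧ aLoop1 fuel n c * aLoop1 fuel n c ≤ n ∧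
      n < (aLoop1 fuel n c + 1) * (aLoop1 fuel n c + 1) := by
  induction fuel generalizing c with
  | zero =>
    simp only [aLoop1]
    push_cast at hf
    refine ⟨le_refl c, h, ?_⟩
    -- fuel 0 forces n ≤ c, so the guard (c+1)² ≤ n cannot hold
    by_contra hcon
    push Not at hcon
    by_cases h0 : 0 ≤ c
    · nlinarith [mul_self_nonneg c]
    · nlinarith [mul_self_nonneg (c + 1)]
  | succ fuel ih =>
    simp only [aLoop1]
    split
    next hg =>
      have hcn : c < n := by
        by_cases h0 : 0 ≤ c
        · nlinarith [mul_self_nonneg c]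
        · nlinarith [mul_self_nonneg (c + 1)]
      obtain ⟨h1, h2, h3⟩ := ih (c + 1) hg (by omega)
      exact ⟨by omega, h2, h3⟩
    next hg =>
      exact ⟨le_refl c, h, by omega⟩

-- with enough fuel, aLoop2 yields the largest divisor of n not exceeding c
theorem aLoop2_spec (fuel : Nat) (n c : Int) (hn : 1 ≤ n) (hc : 1 ≤ c) (hf : c - 1 ≤ (fuel : Int)) :
    1 ≤ aLoop2 fuel n c ∧ aLoop2 fuel n c ≤ c ∧ aLoop2 fuel n c ∣ n ∧
      ∀ d : Int, aLoop2 fuel n c < d → d ≤ c → ¬ d ∣ n := by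
  induction fuel generalizing c with
  | zero =>
    simp only [aLoop2]
    have hc1 : c = 1 := by omega
    subst hc1
    exact ⟨le_refl 1, le_refl 1, one_dvd n, fun d hd1 hd2 _ => absurd hd1 (by omega)⟩
  | succ fuel ih =>
    simp only [aLoop2]
    split
    next hg =>
      obtain ⟨hm, hc1⟩ := hg
      obtain ⟨i1, i2, i3, i4⟩ := ih (c - 1) (by omega) (by omega)
      refine ⟨i1, by omega, i3, ?_⟩
      intro d hd1 hd2 hdvd
      rcases lt_or_eq_of_le hd2 with hlt | heq
      · exact i4 d hd1 (by omega) hdvd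
      · exact hm ((PySem.Int.mod_eq_zero_iff_dvd n c).mpr (heq ▸ hdvd))
    next hg =>
      push Not at hg
      by_cases hm : PySem.Int.mod n c = 0
      · exact ⟨hc, le_refl c, (PySem.Int.mod_eq_zero_iff_dvd n c).mp hm,
          fun d hd1 hd2 _ => absurd hd1 (by omega)⟩
      · have hc1 : c = 1 := by have := hg hm; omega
        subst hc1
        exact ⟨le_refl 1, le_refl 1, one_dvd n, fun d hd1 hd2 _ => absurd hd1 (by omega)⟩

-- with enough fuel, bLoop yields the largest divisor d of n with d² ≤ n (given the loop invariant)
theorem bLoop_spec (fuel : Nat) (n i cols : Int) (hn : 1 ≤ n) (hi : 1 ≤ i) (hcols : 1 ≤ cols)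
    (hsq : cols * cols ≤ n) (hdvd : cols ∣ n)
    (hnone : ∀ d : Int, cols < d → d < i → ¬ d ∣ n) (hf : n + 1 - i ≤ (fuel : Int)) :
    1 ≤ bLoop fuel n i cols ∧ bLoop fuel n i cols ∣ n ∧
      bLoop fuel n i cols * bLoop fuel n i cols ≤ n ∧
      ∀ d : Int, bLoop fuel n i cols < d → d * d ≤ n → ¬ d ∣ n := by
  induction fuel generalizing i cols with
  | zero =>
    simp only [bLoop]
    refine ⟨hcols, hdvd, hsq, ?_⟩
    intro d hd1 hd2 hdvd'
    -- fuel 0 forces n < i; any d with d² ≤ n satisfies d ≤ n < i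
    have hdn : d ≤ n := by nlinarith
    exact hnone d hd1 (by omega) hdvd'
  | succ fuel ih =>
    simp only [bLoop]
    split
    next hg =>
      by_cases hm : PySem.Int.mod n i = 0
      · simp only [if_pos hm]
        exact ih (i + 1) i (by omega) hi hg
          ((PySem.Int.mod_eq_zero_iff_dvd n i).mp hm)
          (fun d hd1 hd2 _ => absurd hd1 (by omega)) (by omega)
      · simp only [if_neg hm]
        refine ih (i + 1) cols (by omega) hcols hsq hdvd ?_ (by omega)
        intro d hd1 hd2 hdvd'
        rcases lt_or_eq_of_le (by omega : d ≤ i) with hlt | heq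
        · exact hnone d hd1 hlt hdvd'
        · exact hm ((PySem.Int.mod_eq_zero_iff_dvd n i).mpr (heq ▸ hdvd'))
    next hg =>
      refine ⟨hcols, hdvd, hsq, ?_⟩
      intro d hd1 hd2 hdvd'
      have hdi : d < i := by nlinarith
      exact hnone d hd1 hdi hdvd'

-- both programs compute the same cols
theorem cols_eq (n : Int) (hn : 1 ≤ n) : aLoop2 n.toNat n (aLoop1 n.toNat n 1) = bLoop n.toNat n 1 1 := by
  obtain ⟨hs1, hs2, hs3⟩ := aLoop1_spec n.toNat n 1 (by omega) (by omega)
  set s := aLoop1 n.toNat n 1 with hs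
  have hsn : s ≤ n := by nlinarith
  obtain ⟨a1, a2, a3, a4⟩ := aLoop2_spec n.toNat n s hn hs1 (by omega)
  set rA := aLoop2 n.toNat n s with hrA
  obtain ⟨b1, b2, b3, b4⟩ := bLoop_spec n.toNat n 1 1 hn (le_refl 1) (le_refl 1) (by omega)
    (one_dvd n) (fun d hd1 hd2 _ => absurd hd1 (by omega)) (by omega)
  set rB := bLoop n.toNat n 1 1 with hrB
  have hA2 : rA * rA ≤ n := by nlinarith
  have hBs : rB ≤ s := by nlinarith
  rcases lt_trichotomy rA rB with hlt | heq | hgt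
  · exact absurd b2 (a4 rB hlt hBs)
  · exact heq
  · exact absurd a3 (b4 rA hgt hA2)

-- rows agree: for a divisor cols ≥ 1 of n, (n + cols - 1) // cols = n // cols
theorem rows_eq (n r : Int) (hr : 1 ≤ r) (hdvd : r ∣ n) :
    PySem.Int.floordiv (n + r - 1) r = PySem.Int.floordiv n r := by
  obtain ⟨k, hk⟩ := hdvd
  rw [PySem.Int.floordiv_eq_ediv_of_pos (show (0:Int) < r by omega),
    PySem.Int.floordiv_eq_ediv_of_pos (show (0:Int) < r by omega)]
  have h1 : n + r - 1 = (r - 1) + k * r := by rw [hk]; ring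
  rw [h1, Int.add_mul_ediv_right _ _ (by omega : r ≠ 0),
    Int.ediv_eq_zero_of_lt (by omega) (by omega), hk,
    Int.mul_ediv_cancel_left _ (by omega : r ≠ 0)]
  omega

-- ===== VERDICT (by name: the statement is the Claim_ definition above) =====
theorem grid_cols_rows_py_spec : Claim_equal_grid_cols_rows_py := by
  intro n _ hpre
  have hn : 1 ≤ n := hpre
  unfold Spec_grid_cols_rows_py grid_cols_rows_py grid_cols_rows_py_alt
  rw [if_neg (by omega), if_neg (by omega)]
  have hcols := cols_eq n hn
  obtain ⟨hs1, hs2, hs3⟩ := aLoop1_spec n.toNat n 1 (by omega) (by omega)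
  have hsn : aLoop1 n.toNat n 1 ≤ n := by nlinarith
  obtain ⟨a1, a2, a3, a4⟩ := aLoop2_spec n.toNat n (aLoop1 n.toNat n 1) hn hs1
    (by omega)
  simp only [hcols.symm]
  exact Prod.ext rfl (rows_eq n _ a1 a3)
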